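-- pv_equiv track=rewrite | github.com/zoedolan/Vybn | fundamental-theory/minimal_invariant.py | count_add_carries_baseb
-- ===== SOURCE A (Python) =====
-- def count_add_carries_baseb(a: int, b: int, base: int = 10) -> int:
--     carries = 0
--     carry = 0
--     aa, bb = a, b
--     while aa > 0 or bb > 0 or carry > 0:
--         da = aa % base
--         db = bb % base
--         s = da + db + carry
--         if s >= base:
--             carries += 1
--             carry = 1
--         else:
--             carry = 0
--         aa //= base; bb //= base
--     return carries
-- ===== SOURCE B (Python) =====
-- def count_add_carries_baseb(a: int, b: int, base: int = 10) -> int: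
--     # Kummer's theorem: carries = (digitsum(a) + digitsum(b) - digitsum(a+b)) / (base-1)
--     def digitsum(n):
--         s = 0
--         while n > 0:
--             s += n % base
--             n //= base
--         return s
--     return (digitsum(a) + digitsum(b) - digitsum(a + b)) // (base - 1)
-- ===== Notes on version B (the rewrite author's own statement) =====
-- stated objective: alternative
-- what changed: Replaced the carry-propagating while loop over paired digits by Kummer's theorem: three independent base-b digit-sum loops combined in the closed form (ds(a)+ds(b)-ds(a+b))//(base-1).
-- outside the precondition, e.g. on count_add_carries_baseb(0, 0, 1): A returns 0, B raises ZeroDivisionError; on count_add_carries_baseb(-5, 2, 10): A returns 0, B returns 0; on count_add_carries_baseb(-5, 7, 10): A does not finish within the time limit, B returns 0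
import Mathlib
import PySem

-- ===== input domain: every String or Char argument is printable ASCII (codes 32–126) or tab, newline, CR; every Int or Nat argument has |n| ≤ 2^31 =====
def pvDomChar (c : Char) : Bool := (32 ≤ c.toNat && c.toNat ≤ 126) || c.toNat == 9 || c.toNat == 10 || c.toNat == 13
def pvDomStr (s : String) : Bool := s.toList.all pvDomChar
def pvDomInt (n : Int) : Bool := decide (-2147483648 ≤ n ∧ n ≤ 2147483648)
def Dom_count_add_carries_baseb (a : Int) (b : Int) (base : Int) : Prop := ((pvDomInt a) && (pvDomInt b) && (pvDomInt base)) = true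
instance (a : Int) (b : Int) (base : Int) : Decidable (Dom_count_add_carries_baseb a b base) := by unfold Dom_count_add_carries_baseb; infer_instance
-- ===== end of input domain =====

-- B replaces A's carry-propagating digit loop by Kummer's theorem (three digit-sum loops and a
-- closed-form combination); alternative algorithm of the same cost, equal on the stated domain.

-- ===== PORT A =====
-- the while loop of A, with fuel making it total (fuel is generous on every Pre_ input)
def pvLoopA (base : Int) : Nat → Int → Int → Int → Int → Int
  | 0, _, _, _, carries => carries
  | fuel+1, aa, bb, carry, carries =>
    if aa > 0 ∨ bb > 0 ∨ carry > 0 then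
      let da := PySem.Int.mod aa base
      let db := PySem.Int.mod bb base
      let s := da + db + carry
      if s ≥ base then
        pvLoopA base fuel (PySem.Int.floordiv aa base) (PySem.Int.floordiv bb base) 1 (carries + 1)
      else
        pvLoopA base fuel (PySem.Int.floordiv aa base) (PySem.Int.floordiv bb base) 0 carries
    else carries

def count_add_carries_baseb (a : Int) (b : Int) (base : Int) : Int :=
  pvLoopA base (a.toNat + b.toNat + 2) a b 0 0

-- ===== PORT B =====
-- the inner digitsum while loop of B, with fuel making it total (generous on every Pre_ input)
def pvDigitSumLoop (base : Int) : Nat → Int → Int → Int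
  | 0, _, s => s
  | fuel+1, n, s =>
    if n > 0 then pvDigitSumLoop base fuel (PySem.Int.floordiv n base) (s + PySem.Int.mod n base)
    else s

def pvDigitSum (base : Int) (n : Int) : Int := pvDigitSumLoop base (n.toNat + 1) n 0

def count_add_carries_baseb_alt (a : Int) (b : Int) (base : Int) : Int :=
  PySem.Int.floordiv (pvDigitSum base a + pvDigitSum base b - pvDigitSum base (a + b)) (base - 1)

-- ===== PRECONDITION & SPEC =====
-- Pre_ is the natural domain: nonnegative a, b with base ≥ 2 (plus the trivially-empty all-nonpositive
-- case with base ≠ 1, where A returns 0 without touching base).  Excluded: base = 0 (A raises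
-- ZeroDivisionError), base = 1 with a positive argument (A loops forever), nonpositive a, b with
-- base = 1 (A returns 0 but B's division by base-1 raises ZeroDivisionError), and mixed-sign inputs,
-- where A either diverges (e.g. (-5, 7, 10)) or terminates by an accident of Python's floor-mod.
def Pre_count_add_carries_baseb (a : Int) (b : Int) (base : Int) : Prop :=
  (0 ≤ a ∧ 0 ≤ b ∧ 2 ≤ base) ∨ (a ≤ 0 ∧ b ≤ 0 ∧ base ≠ 1)
instance (a : Int) (b : Int) (base : Int) : Decidable (Pre_count_add_carries_baseb a b base) := by
  unfold Pre_count_add_carries_baseb; infer_instance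

def pvWitness_count_add_carries_baseb : Int × Int × Int := (19, 87, 10)

def Spec_count_add_carries_baseb (a : Int) (b : Int) (base : Int) (out : Int) : Prop := out = count_add_carries_baseb_alt a b base
instance (a : Int) (b : Int) (base : Int) (out : Int) : Decidable (Spec_count_add_carries_baseb a b base out) := by unfold Spec_count_add_carries_baseb; infer_instance

-- ===== CLAIM (what is proved, stated in full; the proofs are below) =====
def Claim_equal_count_add_carries_baseb : Prop := ∀ (a : Int) (b : Int) (base : Int), Dom_count_add_carries_baseb a b base → Pre_count_add_carries_baseb a b base → Spec_count_add_carries_baseb a b base (count_add_carries_baseb a b base)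

-- ===== LEMMAS AND PROOFS =====

-- base-`base` digit sum of n.toNat, as an Int (the mathematical value both loops compute)
def pvS (base : Int) (n : Int) : Int := ((Nat.digits base.toNat n.toNat).sum : Int)

lemma pvS_split (base m r : Int) (hb : 2 ≤ base) (hm : 0 ≤ m) (hr : 0 ≤ r) (hrb : r < base) :
    pvS base (base * m + r) = r + pvS base m := by
  unfold pvS
  have hbm : 0 ≤ base * m := mul_nonneg (by omega) hm
  by_cases h0 : base * m + r = 0
  · have hm0 : m = 0 := by
      rcases (mul_eq_zero.mp (by omega : base * m = 0)) with h | h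
      · omega
      · exact h
    have hr0 : r = 0 := by omega
    simp [hm0, hr0]
  · have hpos : 0 < base * m + r := by omega
    have hbn : 1 < base.toNat := by omega
    have htn : (base * m + r).toNat = base.toNat * m.toNat + r.toNat := by
      have h1 : base * m + r = ((base.toNat * m.toNat + r.toNat : Nat) : Int) := by
        push_cast
        rw [Int.toNat_of_nonneg (by omega), Int.toNat_of_nonneg hm, Int.toNat_of_nonneg hr]
      rw [h1, Int.toNat_natCast]
    have hntpos : 0 < (base * m + r).toNat := by omega
    rw [htn, Nat.digits_def' hbn (by omega : 0 < base.toNat * m.toNat + r.toNat)]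
    have hrlt : r.toNat < base.toNat := by omega
    have hmod : (base.toNat * m.toNat + r.toNat) % base.toNat = r.toNat := by
      rw [Nat.mul_add_mod, Nat.mod_eq_of_lt hrlt]
    have hdiv : (base.toNat * m.toNat + r.toNat) / base.toNat = m.toNat := by
      rw [Nat.mul_add_div (by omega), Nat.div_eq_of_lt hrlt]; omega
    rw [hmod, hdiv, List.sum_cons]
    push_cast
    rw [Int.toNat_of_nonneg hr]

-- the digitsum loop computes pvS, for any sufficient fuel
lemma pvDigitSumLoop_spec (base : Int) (hb : 2 ≤ base) :
    ∀ (k fuel : Nat) (n s : Int), 0 ≤ n → n.toNat = k → k ≤ fuel →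
      pvDigitSumLoop base fuel n s = s + pvS base n := by
  intro k
  induction k using Nat.strong_induction_on with
  | _ k ih =>
    intro fuel n s hn hk hf
    by_cases hpos : n > 0
    · obtain ⟨f, rfl⟩ : ∃ f, fuel = f + 1 := ⟨fuel - 1, by omega⟩
      rw [pvDigitSumLoop, if_pos hpos]
      rw [PySem.Int.floordiv_eq_ediv_of_pos (by omega), PySem.Int.mod_eq_emod_of_pos (by omega)]
      have hq : 0 ≤ n / base := Int.ediv_nonneg hn (by omega)
      have heq : base * (n / base) + n % base = n := Int.mul_ediv_add_emod n base
      have hm0 : 0 ≤ n % base := Int.emod_nonneg n (by omega)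
      have hmlt : n % base < base := Int.emod_lt_of_pos n (by omega)
      have hdec : (n / base).toNat < k := by
        have h2 : 2 * (n / base) ≤ base * (n / base) := by nlinarith
        omega
      rw [ih _ hdec f (n / base) _ hq rfl (by omega)]
      have := pvS_split base (n / base) (n % base) hb hq hm0 hmlt
      rw [heq] at this
      rw [this]; ring
    · have hn0 : n = 0 := by omega
      subst hn0
      have : k = 0 := by omega
      subst this
      cases fuel with
      | zero => rw [pvDigitSumLoop]; simp [pvS]
      | succ f => rw [pvDigitSumLoop, if_neg hpos]; simp [pvS]

lemma pvDigitSum_spec (base n : Int) (hb : 2 ≤ base) (hn : 0 ≤ n) :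
    pvDigitSum base n = pvS base n := by
  unfold pvDigitSum
  rw [pvDigitSumLoop_spec base hb n.toNat (n.toNat + 1) n 0 hn rfl (by omega)]
  ring

-- B's digitsum loop on a nonpositive argument returns its accumulator at once
lemma pvDigitSum_nonpos (base n : Int) (hn : n ≤ 0) : pvDigitSum base n = 0 := by
  unfold pvDigitSum
  rw [pvDigitSumLoop, if_neg (by omega)]

-- A's loop satisfies Kummer's identity
lemma pvLoopA_spec (base : Int) (hb : 2 ≤ base) :
    ∀ (fuel : Nat) (aa bb c carries : Int), 0 ≤ aa → 0 ≤ bb → (c = 0 ∨ c = 1) →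
      (aa + bb + c).toNat < fuel →
      (base - 1) * (pvLoopA base fuel aa bb c carries - carries) =
        pvS base aa + pvS base bb + c - pvS base (aa + bb + c) := by
  intro fuel
  induction fuel with
  | zero => intro aa bb c carries _ _ _ hf; omega
  | succ f ih =>
    intro aa bb c carries ha hbb hc hf
    by_cases hcond : aa > 0 ∨ bb > 0 ∨ c > 0
    · rw [pvLoopA, if_pos hcond]
      simp only []
      simp only [PySem.Int.floordiv_eq_ediv_of_pos (show (0:Int) < base by omega),
          PySem.Int.mod_eq_emod_of_pos (show (0:Int) < base by omega)]
      set aa' := aa / base with haa'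
      set bb' := bb / base with hbb'
      set da := aa % base with hda
      set db := bb % base with hdb
      have heqa : base * aa' + da = aa := Int.mul_ediv_add_emod aa base
      have heqb : base * bb' + db = bb := Int.mul_ediv_add_emod bb base
      have hda0 : 0 ≤ da := Int.emod_nonneg aa (by omega)
      have hdalt : da < base := Int.emod_lt_of_pos aa (by omega)
      have hdb0 : 0 ≤ db := Int.emod_nonneg bb (by omega)
      have hdblt : db < base := Int.emod_lt_of_pos bb (by omega)
      have ha' : 0 ≤ aa' := Int.ediv_nonneg ha (by omega)
      have hb' : 0 ≤ bb' := Int.ediv_nonneg hbb (by omega)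
      have h2a : 2 * aa' ≤ base * aa' := by nlinarith
      have h2b : 2 * bb' ≤ base * bb' := by nlinarith
      have hSa : pvS base aa = da + pvS base aa' := by
        rw [← heqa]; exact pvS_split base aa' da hb ha' hda0 hdalt
      have hSb : pvS base bb = db + pvS base bb' := by
        rw [← heqb]; exact pvS_split base bb' db hb hb' hdb0 hdblt
      by_cases hs : da + db + c ≥ base
      · rw [if_pos hs]
        have hfuel : (aa' + bb' + 1).toNat < f := by omega
        have := ih aa' bb' 1 (carries + 1) ha' hb' (Or.inr rfl) hfuel
        have hSsum : pvS base (aa + bb + c) = (da + db + c - base) + pvS base (aa' + bb' + 1) := by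
          have he : aa + bb + c = base * (aa' + bb' + 1) + (da + db + c - base) := by
            rw [← heqa, ← heqb]; ring
          rw [he]
          exact pvS_split base (aa' + bb' + 1) (da + db + c - base) hb (by omega) (by omega) (by omega)
        rw [hSa, hSb, hSsum]
        nlinarith [this]
      · rw [if_neg hs]
        have hc' : c = 0 ∨ c > 0 := hc.imp id (by omega)
        have hfuel : (aa' + bb' + 0).toNat < f := by omega
        have := ih aa' bb' 0 carries ha' hb' (Or.inl rfl) hfuel
        have hSsum : pvS base (aa + bb + c) = (da + db + c) + pvS base (aa' + bb' + 0) := by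
          have he : aa + bb + c = base * (aa' + bb' + 0) + (da + db + c) := by
            rw [← heqa, ← heqb]; ring
          rw [he]
          exact pvS_split base (aa' + bb' + 0) (da + db + c) hb (by omega) (by omega) (by omega)
        rw [hSa, hSb, hSsum]
        nlinarith [this]
    · have : aa = 0 ∧ bb = 0 ∧ c = 0 := by omega
      obtain ⟨rfl, rfl, rfl⟩ := this
      rw [pvLoopA, if_neg hcond]
      simp [pvS]

-- ===== VERDICT (by name: the statement is the Claim_ definition above) =====
theorem count_add_carries_baseb_spec : Claim_equal_count_add_carries_baseb := by
  intro a b base _ hpre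
  unfold Spec_count_add_carries_baseb count_add_carries_baseb count_add_carries_baseb_alt
  rcases hpre with ⟨ha, hbb, hb⟩ | ⟨ha, hbb, hb⟩
  · have hK := pvLoopA_spec base hb (a.toNat + b.toNat + 2) a b 0 0 ha hbb (Or.inl rfl)
      (by omega)
    rw [pvDigitSum_spec base a hb ha, pvDigitSum_spec base b hb hbb,
        pvDigitSum_spec base (a + b) hb (by omega)]
    have hkey : pvS base a + pvS base b - pvS base (a + b) =
        (base - 1) * pvLoopA base (a.toNat + b.toNat + 2) a b 0 0 := by
      have h0 : a + b + 0 = a + b := by ring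
      rw [h0, sub_zero] at hK
      linarith [hK]
    rw [hkey, PySem.Int.floordiv_eq_ediv_of_pos (by omega : (0:Int) < base - 1),
        Int.mul_ediv_cancel_left _ (by omega : base - 1 ≠ 0)]
  · have hA : pvLoopA base (a.toNat + b.toNat + 2) a b 0 0 = 0 := by
      rw [pvLoopA, if_neg (by omega)]
    rw [hA, pvDigitSum_nonpos base a ha, pvDigitSum_nonpos base b hbb,
        pvDigitSum_nonpos base (a + b) (by omega)]
    simp [PySem.Int.floordiv]
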